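-- pv_equiv track=rewrite | github.com/rchaks/retrieve-and-rank-tuning | rnr_debug_helpers/utils/rnr_wrappers.py | escape_special_tokens_for_solr_syntax
-- ===== SOURCE A (Python) =====
-- CHARS_THAT_HAVE_TO_BE_ESCAPED = ["\\", "+", "-", "&&", "||", "!", "(", ")", "{", "}", "[", "]", "^", '"', "~", "*",
--                                  "?", ":", "/"]
--
-- SOLR_KEYWORDS_THAT_HAVE_TO_BE_LOWER_CASED = ["AND", "OR", "NOT"]
--
-- def escape_special_tokens_for_solr_syntax(text):
--     modified_text = ""
--     for word in text.split():
--         if word in SOLR_KEYWORDS_THAT_HAVE_TO_BE_LOWER_CASED: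
--             word = '%s' % word.lower()
--         modified_text += " %s" % word
--
--     for char in CHARS_THAT_HAVE_TO_BE_ESCAPED:
--         modified_text = modified_text.replace(char, "\%s" % char)
--
--     return modified_text
-- ===== SOURCE B (Python) =====
-- SOLR_KEYWORDS_THAT_HAVE_TO_BE_LOWER_CASED = ["AND", "OR", "NOT"]
--
-- _ESCAPED_SINGLE_CHARS = "\\+-!(){}[]^\"~*?:/"
--
--
-- def escape_special_tokens_for_solr_syntax(text):
--     words = [w.lower() if w in SOLR_KEYWORDS_THAT_HAVE_TO_BE_LOWER_CASED else w
--              for w in text.split()]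
--     joined = "".join(" " + w for w in words)
--     out = []
--     i = 0
--     n = len(joined)
--     while i < n:
--         pair = joined[i:i + 2]
--         if pair == "&&" or pair == "||":
--             out.append("\\" + pair)
--             i += 2
--         elif joined[i] in _ESCAPED_SINGLE_CHARS:
--             out.append("\\" + joined[i])
--             i += 1
--         else:
--             out.append(joined[i])
--             i += 1
--     return "".join(out)
-- ===== Notes on version B (the rewrite author's own statement) =====
-- stated objective: alternative
-- what changed: B replaces A's 19 sequential str.replace passes over the joined string with a single left-to-right scan that escapes the two-character operator pairs and the single special characters in one traversal.
import Mathlib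
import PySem

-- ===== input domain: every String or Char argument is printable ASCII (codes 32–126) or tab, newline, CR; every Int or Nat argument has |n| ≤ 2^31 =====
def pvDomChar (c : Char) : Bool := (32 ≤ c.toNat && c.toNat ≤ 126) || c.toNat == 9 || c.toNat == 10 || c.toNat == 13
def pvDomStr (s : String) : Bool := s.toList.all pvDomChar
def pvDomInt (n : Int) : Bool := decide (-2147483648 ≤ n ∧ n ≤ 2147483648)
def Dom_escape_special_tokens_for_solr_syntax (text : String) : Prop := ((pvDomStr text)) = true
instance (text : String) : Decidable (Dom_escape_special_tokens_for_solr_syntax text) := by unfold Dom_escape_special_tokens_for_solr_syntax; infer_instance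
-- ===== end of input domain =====

set_option maxRecDepth 100000


-- B replaces A's 19 sequential str.replace passes with one left-to-right scan; same return value, no speed claim.

-- ===== PORT A =====
def pvSolrKeywords : List String := ["AND", "OR", "NOT"]

def pvSolrEscapeStrs : List String :=
  ["\\", "+", "-", "&&", "||", "!", "(", ")", "{", "}", "[", "]", "^", "\"", "~", "*", "?", ":", "/"]

def escape_special_tokens_for_solr_syntax (text : String) : String :=
  let modified_text := (PySem.Str.split₀ text).foldl
    (fun acc word =>
      let word := if word ∈ pvSolrKeywords then PySem.Str.lower word else word
      acc ++ " " ++ word) ""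
  pvSolrEscapeStrs.foldl (fun m ch => PySem.Str.replace m ch ("\\" ++ ch)) modified_text

-- ===== PORT B =====
def pvEscChars : List Char := ['\\', '+', '-', '!', '(', ')', '{', '}', '[', ']', '^', '"', '~', '*', '?', ':', '/']

def pvScanB : List Char → List Char
  | [] => []
  | [c] => if c ∈ pvEscChars then ['\\', c] else [c]
  | c1 :: c2 :: t =>
    if (c1 = '&' ∧ c2 = '&') ∨ (c1 = '|' ∧ c2 = '|') then '\\' :: c1 :: c2 :: pvScanB t
    else if c1 ∈ pvEscChars then '\\' :: c1 :: pvScanB (c2 :: t)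
    else c1 :: pvScanB (c2 :: t)

def escape_special_tokens_for_solr_syntax_alt (text : String) : String :=
  let words := (PySem.Str.split₀ text).map
    (fun w => if w ∈ pvSolrKeywords then PySem.Str.lower w else w)
  let joined := PySem.Chars.join [] (words.map (fun w => ' ' :: w.toList))
  String.ofList (pvScanB joined)

-- ===== PRECONDITION & SPEC =====
def Spec_escape_special_tokens_for_solr_syntax (text : String) (out : String) : Prop := out = escape_special_tokens_for_solr_syntax_alt text
instance (text : String) (out : String) : Decidable (Spec_escape_special_tokens_for_solr_syntax text out) := by unfold Spec_escape_special_tokens_for_solr_syntax; infer_instance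

-- ===== CLAIM (what is proved, stated in full; the proofs are below) =====
def Claim_equal_escape_special_tokens_for_solr_syntax : Prop := ∀ (text : String), Dom_escape_special_tokens_for_solr_syntax text → Spec_escape_special_tokens_for_solr_syntax text (escape_special_tokens_for_solr_syntax text)

-- ===== LEMMAS AND PROOFS =====

-- single-character replace pass c -> "\c", as Python's str.replace performs it
def pvP1 (c : Char) (l : List Char) : List Char :=
  l.flatMap (fun x => if x = c then ['\\', x] else [x])

-- two-character replace pass dd -> "\dd" (d = '&' or '|'), greedy left-to-right
def pvP2 (d : Char) : List Char → List Char
  | [] => []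
  | [x] => [x]
  | x :: y :: t => if x = d ∧ y = d then '\\' :: x :: y :: pvP2 d t else x :: pvP2 d (y :: t)

def pvSL (cs : List Char) (l : List Char) : List Char :=
  cs.foldl (fun m c => pvP1 c m) l

def pvRest14 : List Char := ['!', '(', ')', '{', '}', '[', ']', '^', '"', '~', '*', '?', ':', '/']

-- A's whole escaping chain, on char lists, in A's pass order
def pvA2 (l : List Char) : List Char :=
  pvSL pvRest14 (pvP2 '|' (pvP2 '&' (pvSL ['\\', '+', '-'] l)))

theorem pvGoSingle (c : Char) : ∀ (fuel : Nat) (l acc : List Char), l.length ≤ fuel →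
    PySem.Chars.replace.go [c] ['\\', c] fuel l acc = acc.reverse ++ pvP1 c l := by
  intro fuel
  induction fuel with
  | zero => intro l acc h; cases l with
    | nil => simp [PySem.Chars.replace.go, pvP1]
    | cons x t => simp at h
  | succ n ih =>
    intro l acc h
    cases l with
    | nil => simp [PySem.Chars.replace.go, pvP1]
    | cons x t =>
      rw [PySem.Chars.replace.go]
      by_cases hx : x = c
      · subst hx
        simp only [List.isPrefixOf, beq_self_eq_true, Bool.true_and, if_pos]
        rw [ih _ _ (by simpa using Nat.le_of_succ_le_succ h)]
        simp [pvP1]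
      · have hnp : ¬ ([c].isPrefixOf (x :: t) = true) := by
          simp [List.isPrefixOf]; exact fun h' => hx h'.symm
        rw [if_neg hnp, ih _ _ (Nat.le_of_succ_le_succ h)]
        simp [pvP1, hx]

theorem pvGoPair (d : Char) : ∀ (fuel : Nat) (l acc : List Char), l.length ≤ fuel →
    PySem.Chars.replace.go [d, d] ['\\', d, d] fuel l acc = acc.reverse ++ pvP2 d l := by
  intro fuel
  induction fuel with
  | zero => intro l acc h; cases l with
    | nil => simp [PySem.Chars.replace.go, pvP2]
    | cons x t => simp at h
  | succ n ih =>
    intro l acc h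
    cases l with
    | nil => simp [PySem.Chars.replace.go, pvP2]
    | cons x t =>
      rw [PySem.Chars.replace.go]
      by_cases hp : List.isPrefixOf [d, d] (x :: t) = true
      · obtain ⟨hx, hy⟩ : x = d ∧ t.take 1 = [d] := by
          cases t with
          | nil => simp [List.isPrefixOf] at hp
          | cons y t' =>
            simp [List.isPrefixOf] at hp
            exact ⟨hp.1.symm, by simp [hp.2.symm]⟩
        cases t with
        | nil => simp at hy
        | cons y t' =>
          simp at hy
          subst hx; subst hy
          rw [if_pos hp, ih _ _ (by simp at h ⊢; omega)]
          simp [pvP2]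
      · rw [if_neg hp, ih _ _ (Nat.le_of_succ_le_succ h)]
        cases t with
        | nil => simp [pvP2]
        | cons y t' =>
          have : ¬ (x = d ∧ y = d) := by
            intro ⟨h1, h2⟩; subst h1; subst h2; simp [List.isPrefixOf] at hp
          simp [pvP2, this]

theorem pvReplaceSingle (c : Char) (l : List Char) :
    PySem.Chars.replace l [c] ['\\', c] = pvP1 c l := by
  rw [PySem.Chars.replace]
  simp only [List.isEmpty_cons, if_neg Bool.false_ne_true]
  simpa using pvGoSingle c l.length l [] le_rfl

theorem pvReplacePair (d : Char) (l : List Char) :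
    PySem.Chars.replace l [d, d] ['\\', d, d] = pvP2 d l := by
  rw [PySem.Chars.replace]
  simp only [List.isEmpty_cons, if_neg Bool.false_ne_true]
  simpa using pvGoPair d l.length l [] le_rfl


theorem pvP1_append (c : Char) (a b : List Char) : pvP1 c (a ++ b) = pvP1 c a ++ pvP1 c b := by
  simp [pvP1]

theorem pvP1_single (c x : Char) : pvP1 c [x] = if x = c then ['\\', x] else [x] := by
  simp [pvP1]

theorem pvP1_id (c : Char) (l : List Char) (h : c ∉ l) : pvP1 c l = l := by
  induction l with
  | nil => simp [pvP1]
  | cons x t ih =>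
    simp at h
    simp [pvP1, Ne.symm h.1] at ih ⊢
    exact ih h.2

theorem pvP1_head (c d : Char) (l : List Char) (hd : d ≠ '\\') (h : l.head? ≠ some d) :
    (pvP1 c l).head? ≠ some d := by
  cases l with
  | nil => simp [pvP1]
  | cons x t =>
    simp at h
    by_cases hx : x = c <;> simp [pvP1, hx, Ne.symm hd, h]

theorem pvSL_nil (cs : List Char) : pvSL cs [] = [] := by
  induction cs with
  | nil => rfl
  | cons c cs ih => simpa [pvSL, pvP1] using ih

theorem pvSL_append (cs : List Char) (a b : List Char) :
    pvSL cs (a ++ b) = pvSL cs a ++ pvSL cs b := by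
  induction cs generalizing a b with
  | nil => rfl
  | cons c cs ih => simp [pvSL, List.foldl] at ih ⊢; rw [pvP1_append]; exact ih _ _

theorem pvSL_id (cs : List Char) (l : List Char) (h : ∀ y ∈ l, y ∉ cs) : pvSL cs l = l := by
  induction cs generalizing l with
  | nil => rfl
  | cons c cs ih =>
    have h1 : c ∉ l := fun hc => (h c hc) (by simp)
    simp only [pvSL, List.foldl, pvP1_id c l h1]
    exact ih l (fun y hy hmem => h y hy (by simp [hmem]))

theorem pvSL_single (cs : List Char) (x : Char) (hnd : cs.Nodup) (hbs : '\\' ∉ cs) :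
    pvSL cs [x] = if x ∈ cs then ['\\', x] else [x] := by
  induction cs with
  | nil => simp [pvSL]
  | cons c cs ih =>
    simp at hbs hnd
    by_cases hx : x = c
    · subst hx
      have hid : pvSL cs ['\\', x] = ['\\', x] := by
        apply pvSL_id
        intro y hy
        simp at hy
        rcases hy with rfl | rfl
        · exact hbs.2
        · exact hnd.1
      simp only [pvSL, List.foldl, pvP1_single, if_pos rfl] at hid ⊢
      simpa using hid
    · have step : pvSL (c :: cs) [x] = pvSL cs [x] := by
        simp [pvSL, List.foldl, pvP1_single, hx]
      rw [step, ih hnd.2 hbs.2]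
      simp [hx]

theorem pvSL_head (cs : List Char) (d : Char) (l : List Char) (hd : d ≠ '\\') (h : l.head? ≠ some d) :
    (pvSL cs l).head? ≠ some d := by
  induction cs generalizing l with
  | nil => exact h
  | cons c cs ih => exact ih _ (pvP1_head c d l hd h)

theorem pvP2_cons (d x : Char) (r : List Char) (h : ¬(x = d ∧ r.head? = some d)) :
    pvP2 d (x :: r) = x :: pvP2 d r := by
  cases r with
  | nil => simp [pvP2]
  | cons y t =>
    have : ¬(x = d ∧ y = d) := by simpa using h
    simp [pvP2, this]

theorem pvP2_pair (d : Char) (t : List Char) : pvP2 d (d :: d :: t) = '\\' :: d :: d :: pvP2 d t := by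
  simp [pvP2]

theorem pvP2_head (d d' : Char) (z : List Char) (hd : d' ≠ '\\') (h : z.head? ≠ some d') :
    (pvP2 d z).head? ≠ some d' := by
  match z with
  | [] => simpa [pvP2] using h
  | [x] => simpa [pvP2] using h
  | x :: y :: t =>
    simp at h
    by_cases hxy : x = d ∧ y = d <;> simp [pvP2, hxy, Ne.symm hd, h]


theorem pvRest14_nodup : pvRest14.Nodup := by decide
theorem pvRest14_nobs : '\\' ∉ pvRest14 := by decide

theorem pvA2_cons (c : Char) (r : List Char)
    (h1 : ¬(c = '&' ∧ r.head? = some '&')) (h2 : ¬(c = '|' ∧ r.head? = some '|')) :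
    pvA2 (c :: r) = (if c ∈ pvEscChars then ['\\', c] else [c]) ++ pvA2 r := by
  have hsplit : pvSL ['\\', '+', '-'] (c :: r)
      = pvSL ['\\', '+', '-'] [c] ++ pvSL ['\\', '+', '-'] r := by
    simpa using pvSL_append ['\\', '+', '-'] [c] r
  have hsingle : pvSL ['\\', '+', '-'] [c]
      = if c ∈ ['\\', '+', '-'] then ['\\', c] else [c] := by
    by_cases e1 : c = '\\'
    · subst e1; simp [pvSL, List.foldl, pvP1]
    · by_cases e2 : c = '+'
      · subst e2; simp [pvSL, List.foldl, pvP1]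
      · by_cases e3 : c = '-'
        · subst e3; simp [pvSL, List.foldl, pvP1]
        · simp [pvSL, List.foldl, pvP1, e1, e2, e3]
  by_cases h3 : c ∈ ['\\', '+', '-']
  · -- c escaped already in the first three passes: piece is ['\', c]
    have hcAmp : c ≠ '&' := by rcases (by simpa using h3 : c = '\\' ∨ c = '+' ∨ c = '-') with rfl | rfl | rfl <;> decide
    have hcBar : c ≠ '|' := by rcases (by simpa using h3 : c = '\\' ∨ c = '+' ∨ c = '-') with rfl | rfl | rfl <;> decide
    rw [pvA2, hsplit, hsingle, if_pos h3]
    rw [show ('\\' :: [c]) ++ pvSL ['\\', '+', '-'] r = '\\' :: c :: pvSL ['\\', '+', '-'] r from rfl]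
    rw [pvP2_cons '&' '\\' _ (by simp), pvP2_cons '&' c _ (by simp [hcAmp]),
        pvP2_cons '|' '\\' _ (by simp), pvP2_cons '|' c _ (by simp [hcBar])]
    rw [show ('\\' :: c :: pvP2 '|' (pvP2 '&' (pvSL ['\\', '+', '-'] r)))
          = ['\\'] ++ [c] ++ pvP2 '|' (pvP2 '&' (pvSL ['\\', '+', '-'] r)) from rfl]
    rw [pvSL_append, pvSL_append, pvSL_single _ _ pvRest14_nodup pvRest14_nobs,
        pvSL_single _ _ pvRest14_nodup pvRest14_nobs]
    have hcr : c ∉ pvRest14 := by rcases (by simpa using h3 : c = '\\' ∨ c = '+' ∨ c = '-') with rfl | rfl | rfl <;> decide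
    have hce : c ∈ pvEscChars := by rcases (by simpa using h3 : c = '\\' ∨ c = '+' ∨ c = '-') with rfl | rfl | rfl <;> decide
    rw [if_neg pvRest14_nobs, if_neg hcr, if_pos hce]
    simp [pvA2]
  · rw [pvA2, hsplit, hsingle, if_neg h3]
    by_cases hA : c = '&'
    · subst hA
      have hr : (pvSL ['\\', '+', '-'] r).head? ≠ some '&' := by
        apply pvSL_head _ _ _ (by decide)
        intro hh
        exact h1 ⟨rfl, hh⟩
      rw [show ([('&' : Char)] ++ pvSL ['\\', '+', '-'] r) = '&' :: pvSL ['\\', '+', '-'] r from rfl]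
      rw [pvP2_cons '&' '&' _ (by simp [hr]), pvP2_cons '|' '&' _ (by simp)]
      rw [show ('&' :: pvP2 '|' (pvP2 '&' (pvSL ['\\', '+', '-'] r)))
            = ['&'] ++ pvP2 '|' (pvP2 '&' (pvSL ['\\', '+', '-'] r)) from rfl]
      rw [pvSL_append, pvSL_single _ _ pvRest14_nodup pvRest14_nobs]
      simp [pvA2, pvRest14, pvEscChars]
    · by_cases hO : c = '|'
      · subst hO
        have hr : (pvP2 '&' (pvSL ['\\', '+', '-'] r)).head? ≠ some '|' := by
          apply pvP2_head _ _ _ (by decide)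
          apply pvSL_head _ _ _ (by decide)
          intro hh
          exact h2 ⟨rfl, hh⟩
        rw [show ([('|' : Char)] ++ pvSL ['\\', '+', '-'] r) = '|' :: pvSL ['\\', '+', '-'] r from rfl]
        rw [pvP2_cons '&' '|' _ (by simp), pvP2_cons '|' '|' _ (by simp [hr])]
        rw [show ('|' :: pvP2 '|' (pvP2 '&' (pvSL ['\\', '+', '-'] r)))
              = ['|'] ++ pvP2 '|' (pvP2 '&' (pvSL ['\\', '+', '-'] r)) from rfl]
        rw [pvSL_append, pvSL_single _ _ pvRest14_nodup pvRest14_nobs]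
        simp [pvA2, pvRest14, pvEscChars]
      · rw [show ([c] ++ pvSL ['\\', '+', '-'] r) = c :: pvSL ['\\', '+', '-'] r from rfl]
        rw [pvP2_cons '&' c _ (by simp [hA]), pvP2_cons '|' c _ (by simp [hO])]
        rw [show (c :: pvP2 '|' (pvP2 '&' (pvSL ['\\', '+', '-'] r)))
              = [c] ++ pvP2 '|' (pvP2 '&' (pvSL ['\\', '+', '-'] r)) from rfl]
        rw [pvSL_append, pvSL_single _ _ pvRest14_nodup pvRest14_nobs]
        have hsub : ∀ y ∈ pvRest14, y ∈ pvEscChars := by intro y hy; fin_cases hy <;> decide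
        have hcov : ∀ y ∈ pvEscChars, y ∈ ['\\', '+', '-'] ∨ y ∈ pvRest14 := by intro y hy; fin_cases hy <;> decide
        by_cases hcr : c ∈ pvRest14
        · rw [if_pos hcr, if_pos (hsub c hcr)]
          simp [pvA2]
        · rw [if_neg hcr, if_neg (fun hh => (hcov c hh).elim h3 hcr)]
          simp [pvA2]


theorem pvA2_nil : pvA2 [] = [] := by
  rw [pvA2, pvSL_nil]
  simp only [pvP2]
  exact pvSL_nil _

theorem pvA2_eq_scan (l : List Char) : pvA2 l = pvScanB l := by
  induction l using pvScanB.induct with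
  | case1 => rw [pvA2_nil]; rfl
  | case2 c hc =>
    rw [pvA2_cons c [] (by simp) (by simp), pvA2_nil]
    simp [pvScanB, hc]
  | case3 c hc =>
    rw [pvA2_cons c [] (by simp) (by simp), pvA2_nil]
    simp [pvScanB, hc]
  | case4 c1 c2 t h ih =>
    rcases h with ⟨rfl, rfl⟩ | ⟨rfl, rfl⟩
    · have hs : pvSL ['\\', '+', '-'] ('&' :: '&' :: t) = '&' :: '&' :: pvSL ['\\', '+', '-'] t := by
        have := pvSL_append ['\\', '+', '-'] ['&'] ('&' :: t)
        have h2 := pvSL_append ['\\', '+', '-'] ['&'] t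
        simp only [List.singleton_append] at this h2
        rw [this, h2]
        have : pvSL ['\\', '+', '-'] ['&'] = ['&'] :=
          pvSL_id _ _ (by intro y hy; simp at hy; subst hy; decide)
        simp [this]
      rw [pvA2, hs, pvP2_pair, pvP2_cons '|' '\\' _ (by simp), pvP2_cons '|' '&' _ (by simp),
          pvP2_cons '|' '&' _ (by simp)]
      rw [show ('\\' :: '&' :: '&' :: pvP2 '|' (pvP2 '&' (pvSL ['\\', '+', '-'] t)))
            = ['\\'] ++ ['&'] ++ ['&'] ++ pvP2 '|' (pvP2 '&' (pvSL ['\\', '+', '-'] t)) from rfl]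
      rw [pvSL_append, pvSL_append, pvSL_append]
      rw [pvSL_single _ _ pvRest14_nodup pvRest14_nobs, pvSL_single _ _ pvRest14_nodup pvRest14_nobs]
      rw [if_neg pvRest14_nobs, if_neg (by decide : ('&' : Char) ∉ pvRest14)]
      rw [show pvSL pvRest14 (pvP2 '|' (pvP2 '&' (pvSL ['\\', '+', '-'] t))) = pvA2 t from rfl, ih]
      simp [pvScanB]
    · have hs : pvSL ['\\', '+', '-'] ('|' :: '|' :: t) = '|' :: '|' :: pvSL ['\\', '+', '-'] t := by
        have := pvSL_append ['\\', '+', '-'] ['|'] ('|' :: t)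
        have h2 := pvSL_append ['\\', '+', '-'] ['|'] t
        simp only [List.singleton_append] at this h2
        rw [this, h2]
        have : pvSL ['\\', '+', '-'] ['|'] = ['|'] :=
          pvSL_id _ _ (by intro y hy; simp at hy; subst hy; decide)
        simp [this]
      rw [pvA2, hs, pvP2_cons '&' '|' _ (by simp), pvP2_cons '&' '|' _ (by simp), pvP2_pair]
      rw [show ('\\' :: '|' :: '|' :: pvP2 '|' (pvP2 '&' (pvSL ['\\', '+', '-'] t)))
            = ['\\'] ++ ['|'] ++ ['|'] ++ pvP2 '|' (pvP2 '&' (pvSL ['\\', '+', '-'] t)) from rfl]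
      rw [pvSL_append, pvSL_append, pvSL_append]
      rw [pvSL_single _ _ pvRest14_nodup pvRest14_nobs, pvSL_single _ _ pvRest14_nodup pvRest14_nobs]
      rw [if_neg pvRest14_nobs, if_neg (by decide : ('|' : Char) ∉ pvRest14)]
      rw [show pvSL pvRest14 (pvP2 '|' (pvP2 '&' (pvSL ['\\', '+', '-'] t))) = pvA2 t from rfl, ih]
      simp [pvScanB]
  | case5 c1 c2 t h hc ih =>
    have h1 : ¬(c1 = '&' ∧ (c2 :: t).head? = some '&') := by
      intro ⟨ha, hb⟩; simp at hb; exact h (Or.inl ⟨ha, hb⟩)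
    have h2 : ¬(c1 = '|' ∧ (c2 :: t).head? = some '|') := by
      intro ⟨ha, hb⟩; simp at hb; exact h (Or.inr ⟨ha, hb⟩)
    rw [pvA2_cons c1 (c2 :: t) h1 h2, ih]
    rw [show pvScanB (c1 :: c2 :: t)
          = if (c1 = '&' ∧ c2 = '&') ∨ (c1 = '|' ∧ c2 = '|') then '\\' :: c1 :: c2 :: pvScanB t
            else if c1 ∈ pvEscChars then '\\' :: c1 :: pvScanB (c2 :: t)
            else c1 :: pvScanB (c2 :: t) from rfl, if_neg h]
    rw [if_pos hc, if_pos hc]; rfl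
  | case6 c1 c2 t h hc ih =>
    have h1 : ¬(c1 = '&' ∧ (c2 :: t).head? = some '&') := by
      intro ⟨ha, hb⟩; simp at hb; exact h (Or.inl ⟨ha, hb⟩)
    have h2 : ¬(c1 = '|' ∧ (c2 :: t).head? = some '|') := by
      intro ⟨ha, hb⟩; simp at hb; exact h (Or.inr ⟨ha, hb⟩)
    rw [pvA2_cons c1 (c2 :: t) h1 h2, ih]
    rw [show pvScanB (c1 :: c2 :: t)
          = if (c1 = '&' ∧ c2 = '&') ∨ (c1 = '|' ∧ c2 = '|') then '\\' :: c1 :: c2 :: pvScanB t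
            else if c1 ∈ pvEscChars then '\\' :: c1 :: pvScanB (c2 :: t)
            else c1 :: pvScanB (c2 :: t) from rfl, if_neg h]
    rw [if_neg hc, if_neg hc]; rfl

theorem pvJoinNil (parts : List (List Char)) : PySem.Chars.join [] parts = parts.flatten := by
  induction parts with
  | nil => simp [PySem.Chars.join, List.intercalate]
  | cons p ps ih =>
    simp [PySem.Chars.join, List.intercalate] at ih ⊢
    cases ps <;> simp_all [List.intersperse]

theorem pvPhase1 (ws : List String) (acc : String) :
    (ws.foldl (fun acc word =>
        acc ++ " " ++ (if word ∈ pvSolrKeywords then PySem.Str.lower word else word)) acc).toList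
      = acc.toList ++ ws.flatMap
          (fun w => ' ' :: (if w ∈ pvSolrKeywords then PySem.Str.lower w else w).toList) := by
  induction ws generalizing acc with
  | nil => simp
  | cons w ws ih =>
    rw [List.foldl_cons, ih]
    simp

theorem pvChainEq (m : String) :
    (pvSolrEscapeStrs.foldl (fun m ch => PySem.Str.replace m ch ("\\" ++ ch)) m).toList
      = pvA2 m.toList := by
  simp only [pvSolrEscapeStrs, List.foldl, PySem.Str.toList_replace]
  simp
  simp only [pvReplaceSingle, pvReplacePair]
  simp [pvA2, pvSL, pvRest14, List.foldl]

theorem pvAltToList (text : String) :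
    (escape_special_tokens_for_solr_syntax_alt text).toList
      = pvScanB ((PySem.Str.split₀ text).flatMap
          (fun w => ' ' :: (if w ∈ pvSolrKeywords then PySem.Str.lower w else w).toList)) := by
  simp only [escape_special_tokens_for_solr_syntax_alt]
  rw [pvJoinNil]
  simp [List.flatMap_def, List.map_map, Function.comp_def]

-- ===== VERDICT (by name: the statement is the Claim_ definition above) =====
theorem escape_special_tokens_for_solr_syntax_spec : Claim_equal_escape_special_tokens_for_solr_syntax := by
  intro text _
  unfold Spec_escape_special_tokens_for_solr_syntax
  refine String.toList_inj.mp ?_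
  rw [pvAltToList]
  simp only [escape_special_tokens_for_solr_syntax]
  rw [pvChainEq, pvPhase1]
  simp only [String.toList_empty, List.nil_append]
  exact pvA2_eq_scan _
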